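-- pv_equiv track=rewrite | github.com/inventaire-des-orgues/portail | orgues/management/utilsorgues/tools/generiques.py | createpaireencode
-- ===== SOURCE A (Python) =====
-- def createpaireencode(string):
--     alphabet = 'a b c d e f g h i j k l m n o p q r s t u v w x y z'
--     vecalphabet = alphabet.split(' ')
--     pairevec = vecalphabet + [(x + y) for x in vecalphabet for y in vecalphabet]
--     d = []
--     for i in pairevec:
--         d = d + [string.count(i)]
--     return string, d
-- ===== SOURCE B (Python) =====
-- def createpaireencode(string):
--     singles = 'abcdefghijklmnopqrstuvwxyz'
--     chars = {}
--     for ch in string: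
--         chars[ch] = chars.get(ch, 0) + 1
--     pairs = {}
--     prev = None  # the pair counted at the previous position, if any
--     for p in zip(string, string[1:]):
--         if p == prev:
--             prev = None  # overlaps the occurrence just counted: skip it
--         else:
--             pairs[p] = pairs.get(p, 0) + 1
--             prev = p
--     d = [chars.get(c, 0) for c in singles]
--     for x in singles:
--         for y in singles:
--             d.append(pairs.get((x, y), 0))
--     return string, d
-- ===== Notes on version B (the rewrite author's own statement) =====
-- stated objective: faster
-- what changed: A scans the whole string 702 times (str.count for each letter and letter pair); B makes one pass, tallying characters in a dict and non-overlapping adjacent pairs in a dict keyed by pair, tracking the previously counted pair to enforce str.count's non-overlap rule.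
import Mathlib
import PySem

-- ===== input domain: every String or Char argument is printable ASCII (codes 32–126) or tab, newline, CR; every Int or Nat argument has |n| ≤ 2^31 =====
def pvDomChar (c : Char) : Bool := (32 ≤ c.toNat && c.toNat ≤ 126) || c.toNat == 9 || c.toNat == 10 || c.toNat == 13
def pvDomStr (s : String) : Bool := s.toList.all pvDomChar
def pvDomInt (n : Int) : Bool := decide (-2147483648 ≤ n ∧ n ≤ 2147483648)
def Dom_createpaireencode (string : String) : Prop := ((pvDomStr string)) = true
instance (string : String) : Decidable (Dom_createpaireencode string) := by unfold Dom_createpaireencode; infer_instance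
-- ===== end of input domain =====

-- B replaces A's 702 full scans of the string (str.count once per letter and once per
-- letter pair) by a single pass that tallies characters and non-overlapping adjacent
-- pairs into dictionaries; objective: faster (one traversal instead of 702).

-- ===== PORT A =====
def createpaireencode (string : String) : String × List Int :=
  let alphabet : String := "a b c d e f g h i j k l m n o p q r s t u v w x y z"
  let vecalphabet : List String := (PySem.Str.split? alphabet " ").getD []   -- sep ≠ "", so split? is some
  let pairevec : List String :=
    vecalphabet ++ (vecalphabet.flatMap fun x => vecalphabet.map fun y => x ++ y)
  let d : List Int := pairevec.foldl (fun d i => d ++ [(PySem.Str.count string i : Int)]) []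
  (string, d)

-- ===== PORT B =====
-- one pass: character tallies, and pair tallies threading `prev` = the pair counted at
-- the previous position (a pair equal to it would overlap: str.count's non-overlap rule)
def createpaireencode_alt (string : String) : String × List Int :=
  let singles : List Char := "abcdefghijklmnopqrstuvwxyz".toList
  let chars : PySem.Dict Char Int :=
    string.toList.foldl (fun d ch => d.insert ch (d.getD ch 0 + 1)) PySem.Dict.empty
  let st : PySem.Dict (Char × Char) Int × Option (Char × Char) :=
    (string.toList.zip (string.toList.drop 1)).foldl    -- zip(string, string[1:])
      (fun st p =>
        if some p = st.2 then (st.1, none)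
        else (st.1.insert p (st.1.getD p 0 + 1), some p))
      (PySem.Dict.empty, none)
  let pairs : PySem.Dict (Char × Char) Int := st.1
  let d : List Int := singles.map (fun c => chars.getD c 0)
  let d := d ++ singles.flatMap (fun x => singles.map fun y => pairs.getD (x, y) 0)
  (string, d)

-- ===== PRECONDITION & SPEC =====
def Spec_createpaireencode (string : String) (out : String × List Int) : Prop := out = createpaireencode_alt string
instance (string : String) (out : String × List Int) : Decidable (Spec_createpaireencode string out) := by unfold Spec_createpaireencode; infer_instance

-- ===== CLAIM (what is proved, stated in full; the proofs are below) =====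
def Claim_equal_createpaireencode : Prop := ∀ (string : String), Dom_createpaireencode string → Spec_createpaireencode string (createpaireencode string)

-- ===== LEMMAS AND PROOFS =====

-- non-overlapping count of the two-char pattern [x, y] in a char list (str.count's rule)
def pairCount (x y : Char) : List Char → Nat
  | a :: b :: t => if a = x ∧ b = y then 1 + pairCount x y t else pairCount x y (b :: t)
  | _ => 0

-- what B's pair loop adds for key q, threading `prev`
def gcount (q : Char × Char) : List (Char × Char) → Option (Char × Char) → Int
  | [], _ => 0
  | p :: t, prev =>
      if some p = prev then gcount q t none
      else (if p = q then 1 else 0) + gcount q t (some p)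

theorem go_single (c : Char) : ∀ (fuel : Nat) (l : List Char) (acc : Nat),
    l.length ≤ fuel → PySem.Chars.count.go [c] fuel l acc = acc + l.count c := by
  intro fuel
  induction fuel with
  | zero =>
    intro l acc h
    have : l = [] := List.eq_nil_of_length_eq_zero (Nat.le_zero.mp h)
    subst this; rw [PySem.Chars.count.go.eq_def]; simp
  | succ n ih =>
    intro l acc h
    cases l with
    | nil => rw [PySem.Chars.count.go.eq_def]; simp
    | cons a t =>
      rw [PySem.Chars.count.go.eq_def]
      simp only [List.length_cons] at h
      by_cases hc : c = a
      · have hpre : [c].isPrefixOf (a :: t) = true := by simp [List.isPrefixOf, hc]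
        simp only [hpre, if_true]
        rw [show List.drop [c].length (a :: t) = t from by simp]
        rw [ih t (acc + 1) (by omega)]
        simp [hc]
        omega
      · have hpre : [c].isPrefixOf (a :: t) = false := by
          simp [List.isPrefixOf]; exact fun h => absurd h hc
        simp only [hpre, Bool.false_eq_true, if_false]
        rw [ih t acc (by omega)]
        have : ¬ (a = c) := fun h => hc h.symm
        simp [List.count_cons, this]

theorem go_pair (x y : Char) : ∀ (fuel : Nat) (l : List Char) (acc : Nat),
    l.length ≤ fuel → PySem.Chars.count.go [x, y] fuel l acc = acc + pairCount x y l := by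
  intro fuel
  induction fuel with
  | zero =>
    intro l acc h
    have : l = [] := List.eq_nil_of_length_eq_zero (Nat.le_zero.mp h)
    subst this; rw [PySem.Chars.count.go.eq_def]; simp [pairCount]
  | succ n ih =>
    intro l acc h
    cases l with
    | nil => rw [PySem.Chars.count.go.eq_def]; simp [pairCount]
    | cons a t =>
      cases t with
      | nil =>
        rw [PySem.Chars.count.go.eq_def]
        have hpre : [x, y].isPrefixOf [a] = false := by simp [List.isPrefixOf]
        simp only [hpre, Bool.false_eq_true, if_false]
        rw [PySem.Chars.count.go.eq_def]
        cases n <;> simp [pairCount]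
      | cons b u =>
        rw [PySem.Chars.count.go.eq_def]
        simp only [List.length_cons] at h
        by_cases hp : x = a ∧ y = b
        · have hpre : [x, y].isPrefixOf (a :: b :: u) = true := by
            simp [List.isPrefixOf, hp.1, hp.2]
          simp only [hpre, if_true]
          rw [show List.drop [x, y].length (a :: b :: u) = u from by simp]
          rw [ih u (acc + 1) (by omega)]
          have hq : a = x ∧ b = y := ⟨hp.1.symm, hp.2.symm⟩
          simp [pairCount, hq]
          omega
        · have hpre : [x, y].isPrefixOf (a :: b :: u) = false := by
            simp [List.isPrefixOf]
            intro h1; intro h2; exact absurd ⟨h1, h2⟩ hp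
          simp only [hpre, Bool.false_eq_true, if_false]
          rw [ih (b :: u) acc (by simp; omega)]
          have hq : ¬ (a = x ∧ b = y) := fun ⟨h1, h2⟩ => hp ⟨h1.symm, h2.symm⟩
          simp [pairCount, hq]

theorem count_single (s : List Char) (c : Char) :
    PySem.Chars.count s [c] = s.count c := by
  unfold PySem.Chars.count
  simpa using go_single c s.length s 0 (le_refl _)

theorem count_pair (s : List Char) (x y : Char) :
    PySem.Chars.count s [x, y] = pairCount x y s := by
  unfold PySem.Chars.count
  simpa using go_pair x y s.length s 0 (le_refl _)

-- B's dict fold, read per key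
theorem foldl_pairs (q : Char × Char) :
    ∀ (ps : List (Char × Char)) (d : PySem.Dict (Char × Char) Int) (prev : Option (Char × Char)),
    ((ps.foldl
        (fun (st : PySem.Dict (Char × Char) Int × Option (Char × Char)) p =>
          if some p = st.2 then (st.1, none)
          else (st.1.insert p (st.1.getD p 0 + 1), some p))
        (d, prev)).1).getD q 0 = d.getD q 0 + gcount q ps prev := by
  intro ps
  induction ps with
  | nil => intro d prev; simp [gcount]
  | cons p t ih =>
    intro d prev
    simp only [List.foldl_cons, gcount]
    by_cases hp : some p = prev
    · simp only [if_pos hp, ih]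
    · simp only [if_neg hp, ih]
      rw [PySem.Dict.getD_insert]
      by_cases hq : q = p
      · simp [hq]; omega
      · have : ¬ (p = q) := fun h => hq h.symm
        simp [hq, this]

-- a pending pair ≠ q cannot affect q's tally
theorem gcount_some_ne (q r : Char × Char) (h : r ≠ q) :
    ∀ ps, gcount q ps (some r) = gcount q ps none := by
  intro ps
  induction ps with
  | nil => simp [gcount]
  | cons p t ih =>
    simp only [gcount]
    by_cases hp : p = r
    · subst hp
      simp only [if_pos rfl, if_neg (by simp : ¬ (some p = (none : Option (Char × Char))))]
      rw [ih]
      simp [show ¬ (p = q) from h]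
    · have h1 : ¬ (some p = some r) := by simp [hp]
      have h2 : ¬ (some p = (none : Option (Char × Char))) := by simp
      simp only [if_neg h1, if_neg h2]

-- main bridge: B's threaded scan computes the non-overlapping pair count
theorem gcount_eq_pairCount (x y : Char) :
    ∀ (n : Nat) (s : List Char), s.length ≤ n →
      (gcount (x, y) (s.zip (s.drop 1)) none = (pairCount x y s : Int) ∧
       ∀ b t, s = b :: t → gcount (x, y) (s.zip (s.drop 1)) (some (x, y)) = (pairCount x y t : Int)) := by
  intro n
  induction n with
  | zero =>
    intro s h
    have : s = [] := List.eq_nil_of_length_eq_zero (Nat.le_zero.mp h)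
    subst this
    exact ⟨by simp [gcount, pairCount], by intro b t h; cases h⟩
  | succ n ih =>
    intro s h
    constructor
    · match s with
      | [] => simp [gcount, pairCount]
      | [a] => simp [gcount, pairCount]
      | a :: b :: t =>
        have hzip : (a :: b :: t).zip ((a :: b :: t).drop 1) = (a, b) :: ((b :: t).zip ((b :: t).drop 1)) := by
          simp [List.zip]
        rw [hzip]
        rw [show gcount (x, y) ((a, b) :: ((b :: t).zip ((b :: t).drop 1))) none
            = (if (a, b) = (x, y) then 1 else 0) + gcount (x, y) ((b :: t).zip ((b :: t).drop 1)) (some (a, b)) from by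
          simp [gcount]]
        by_cases hq : (a, b) = (x, y)
        · have h2 := (ih (b :: t) (by simp at h ⊢; omega)).2 b t rfl
          rw [hq, h2]
          have hax : a = x := congrArg Prod.fst hq
          have hby : b = y := congrArg Prod.snd hq
          simp [pairCount, hax, hby]
        · rw [gcount_some_ne (x, y) (a, b) hq]
          rw [(ih (b :: t) (by simp at h ⊢; omega)).1]
          have hq' : ¬ (a = x ∧ b = y) := by
            intro ⟨h1, h2⟩; exact hq (by simp [h1, h2])
          simp [pairCount, hq', hq]
    · intro b t hs
      subst hs
      match t with
      | [] => simp [gcount, pairCount]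
      | c :: u =>
        have hzip : (b :: c :: u).zip ((b :: c :: u).drop 1) = (b, c) :: ((c :: u).zip ((c :: u).drop 1)) := by
          simp [List.zip]
        rw [hzip]
        by_cases hq : (b, c) = (x, y)
        · rw [show gcount (x, y) ((b, c) :: ((c :: u).zip ((c :: u).drop 1))) (some (x, y))
              = gcount (x, y) ((c :: u).zip ((c :: u).drop 1)) none from by
            simp [gcount, hq]]
          rw [(ih (c :: u) (by simp at h ⊢; omega)).1]
        · rw [show gcount (x, y) ((b, c) :: ((c :: u).zip ((c :: u).drop 1))) (some (x, y))
              = (if (b, c) = (x, y) then (1:Int) else 0) + gcount (x, y) ((c :: u).zip ((c :: u).drop 1)) (some (b, c)) from by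
            simp [gcount, hq]]
          rw [gcount_some_ne (x, y) (b, c) hq]
          rw [(ih (c :: u) (by simp at h ⊢; omega)).1]
          simp [hq, pairCount]

-- A's split result is the 26 one-letter strings
theorem vec_eq : (PySem.Str.split? "a b c d e f g h i j k l m n o p q r s t u v w x y z" " ").getD []
    = ("abcdefghijklmnopqrstuvwxyz".toList.map (fun c => String.ofList [c])) := by decide

theorem bridge1 (s : String) (c : Char) :
    (PySem.Str.count s (String.ofList [c]) : Int) = (s.toList.count c : Int) := by
  simp [PySem.Str.count, count_single]

theorem bridge2 (s : String) (x y : Char) :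
    (PySem.Str.count s (String.ofList [x] ++ String.ofList [y]) : Int) = (pairCount x y s.toList : Int) := by
  simp [PySem.Str.count, count_pair]

theorem bridgeB2 (s : List Char) (x y : Char) :
    (((s.zip (s.drop 1)).foldl
        (fun (st : PySem.Dict (Char × Char) Int × Option (Char × Char)) p =>
          if some p = st.2 then (st.1, none)
          else (st.1.insert p (st.1.getD p 0 + 1), some p))
        (PySem.Dict.empty, none)).1).getD (x, y) 0 = (pairCount x y s : Int) := by
  rw [foldl_pairs]
  rw [(gcount_eq_pairCount x y s.length s (le_refl _)).1]
  simp

-- ===== VERDICT (by name: the statement is the Claim_ definition above) =====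
theorem createpaireencode_spec : Claim_equal_createpaireencode := by
  intro s _
  unfold Spec_createpaireencode
  simp only [createpaireencode, createpaireencode_alt, vec_eq,
    PySem.List.foldl_append_singleton_eq_map, List.nil_append,
    List.map_append, List.flatMap_map, List.map_map, List.map_flatMap,
    Function.comp_def, bridge1, bridge2,
    PySem.Dict.getD_foldl_insert_add_one, PySem.Dict.getD_empty, bridgeB2, zero_add]
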